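-- pv_equiv track=rewrite | github.com/picsolab/Measuring-Online-Information-Campaigns | src/language/liwc.py | get_cat2lex
-- ===== SOURCE A (Python) =====
-- def get_cat2lex(cat, dic):
--     lex2cat, cat2lex = {}, {}
--     for lexicon in dic:
--         for ci in dic[lexicon]:
--             c = cat[ci]
--             cat2lex.setdefault(c, set())
--             cat2lex[c].add(lexicon)
--             lex2cat.setdefault(lexicon, set())
--             lex2cat[lexicon].add(c)
--     return cat2lex, lex2cat
-- ===== SOURCE B (Python) =====
-- def get_cat2lex(cat, dic):
--     # Stage 1: flatten dic into a deduplicated flat (lexicon, category) edge list.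
--     edges = []
--     for lexicon, cis in dic.items():
--         for ci in cis:
--             e = (lexicon, cat[ci])
--             if e not in edges:
--                 edges.append(e)
--     # Stage 2: group the flat edge list by each side independently.
--     cat2lex = {}
--     for lexicon, c in edges:
--         cat2lex.setdefault(c, set()).add(lexicon)
--     lex2cat = {}
--     for lexicon, c in edges:
--         lex2cat.setdefault(lexicon, set()).add(c)
--     return cat2lex, lex2cat
-- ===== Notes on version B (the rewrite author's own statement) =====
-- stated objective: alternative
-- what changed: A fills both dicts-of-sets inside one nested pass over dic; B first flattens dic into a deduplicated flat (lexicon, category) edge list, then builds cat2lex and lex2cat in two independent grouping passes over that flat list.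
import Mathlib
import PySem

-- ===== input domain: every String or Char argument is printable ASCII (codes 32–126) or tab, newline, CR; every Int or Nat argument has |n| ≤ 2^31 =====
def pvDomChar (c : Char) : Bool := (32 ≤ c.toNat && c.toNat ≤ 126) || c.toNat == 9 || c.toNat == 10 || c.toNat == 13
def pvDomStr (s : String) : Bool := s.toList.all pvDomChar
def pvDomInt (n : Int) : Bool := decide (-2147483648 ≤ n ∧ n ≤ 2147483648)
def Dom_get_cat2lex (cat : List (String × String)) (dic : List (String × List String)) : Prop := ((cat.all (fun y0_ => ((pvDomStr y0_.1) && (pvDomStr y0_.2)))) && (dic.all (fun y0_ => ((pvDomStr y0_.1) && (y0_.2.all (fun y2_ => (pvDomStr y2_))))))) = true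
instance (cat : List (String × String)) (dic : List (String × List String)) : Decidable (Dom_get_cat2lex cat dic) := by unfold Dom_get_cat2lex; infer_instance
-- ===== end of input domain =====

-- B replaces A's single combined pass over dic (filling both dicts-of-sets at once) by a
-- flatten-then-group pipeline: stage 1 builds a deduplicated flat (lexicon, category)
-- edge list from dic; stage 2 builds cat2lex and lex2cat in two independent grouping
-- passes over that flat list. Equivalence is about return values.

-- shared one-line dict update both Pythons perform: d.setdefault(k, set()); d[k].add(v)
def pvUpd (d : PySem.Dict String (PySem.Set String)) (k v : String) :
    PySem.Dict String (PySem.Set String) :=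
  d.insert k (PySem.Set.add (d.getD k PySem.Set.empty) v)

-- ===== PORT A =====
def get_cat2lex (cat : List (String × String)) (dic : List (String × List String)) :
    (List (String × List String)) × (List (String × List String)) :=
  let catD := PySem.Dict.ofList cat
  let dicD := PySem.Dict.ofList dic
  let st := dicD.keys.foldl (fun st lexicon =>
      (dicD.getD lexicon []).foldl (fun st ci =>
        (pvUpd st.1 (catD.getD ci "") lexicon, pvUpd st.2 lexicon (catD.getD ci ""))) st)
    (PySem.Dict.empty, PySem.Dict.empty)
  (st.1.items, st.2.items)

-- ===== PORT B =====
def get_cat2lex_alt (cat : List (String × String)) (dic : List (String × List String)) :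
    (List (String × List String)) × (List (String × List String)) :=
  let catD := PySem.Dict.ofList cat
  -- stage 1: deduplicated flat (lexicon, category) edge list
  let edges := (PySem.Dict.ofList dic).items.foldl (fun es p =>
      p.2.foldl (fun es ci =>
        if (p.1, catD.getD ci "") ∈ es then es else es ++ [(p.1, catD.getD ci "")]) es) []
  -- stage 2: two independent grouping passes over the flat list
  let cat2lex := edges.foldl (fun d e => pvUpd d e.2 e.1) PySem.Dict.empty
  let lex2cat := edges.foldl (fun l e => pvUpd l e.1 e.2) PySem.Dict.empty
  (cat2lex.items, lex2cat.items)

-- ===== PRECONDITION & SPEC =====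
-- Pre_ excludes exactly the inputs on which Python A raises KeyError: some category
-- index ci read from dic (after dict key collapse) that is not a key of cat.
def Pre_get_cat2lex (cat : List (String × String)) (dic : List (String × List String)) : Prop :=
  ∀ v ∈ (PySem.Dict.ofList dic).values, ∀ ci ∈ v, ci ∈ cat.map Prod.fst
instance (cat : List (String × String)) (dic : List (String × List String)) : Decidable (Pre_get_cat2lex cat dic) := by unfold Pre_get_cat2lex; infer_instance

def pvWitness_get_cat2lex : (List (String × String)) × (List (String × List String)) :=
  ([("0", "Cx"), ("1", "Cy")], [("word", ["0", "1"]), ("other", ["1"])])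

def Spec_get_cat2lex (cat : List (String × String)) (dic : List (String × List String)) (out : (List (String × List String)) × (List (String × List String))) : Prop := out = get_cat2lex_alt cat dic
instance (cat : List (String × String)) (dic : List (String × List String)) (out : (List (String × List String)) × (List (String × List String))) : Decidable (Spec_get_cat2lex cat dic out) := by unfold Spec_get_cat2lex; infer_instance

-- ===== CLAIM =====
def Claim_equal_get_cat2lex : Prop := ∀ (cat : List (String × String)) (dic : List (String × List String)), Dom_get_cat2lex cat dic → Pre_get_cat2lex cat dic → Spec_get_cat2lex cat dic (get_cat2lex cat dic)

-- ===== LEMMAS AND PROOFS =====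

-- the flat edge list both sides are really traversing
def pvEdges (catD : PySem.Dict String String) (dicD : PySem.Dict String (List String)) :
    List (String × String) :=
  dicD.items.flatMap (fun p => p.2.map (fun ci => (p.1, catD.getD ci "")))

-- generic grouping step, parametrised by which pair component is the key
def pvStep (key val : String × String → String)
    (d : PySem.Dict String (PySem.Set String)) (e : String × String) :
    PySem.Dict String (PySem.Set String) :=
  pvUpd d (key e) (val e)

-- nested loop = single fold over the flattened list
theorem pv_foldl_flatMap {α β σ : Type} (l : List α) (f : α → List β) (g : σ → β → σ)
    (init : σ) :
    l.foldl (fun s a => (f a).foldl g s) init = (l.flatMap f).foldl g init := by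
  induction l generalizing init with
  | nil => rfl
  | cons a l ih => simp [List.foldl_append, ih]

-- a fold with componentwise pair state splits into two folds
theorem pv_pairSplit {α σ τ : Type} (f : σ → α → σ) (g : τ → α → τ) (l : List α)
    (s : σ) (t : τ) :
    l.foldl (fun st a => (f st.1 a, g st.2 a)) (s, t) = (l.foldl f s, l.foldl g t) := by
  induction l generalizing s t with
  | nil => rfl
  | cons a l ih => simpa using ih (f s a) (g t a)

-- overwriting a key with its current value is the identity (keys unique)
theorem pv_insert_self {d : PySem.Dict String (PySem.Set String)} {c : String}
    {v : PySem.Set String} (hnd : d.keys.Nodup) (h : d.get? c = some v) :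
    d.insert c v = d := by
  apply PySem.Dict.ext
  rw [PySem.Dict.items_insert_of_contains _ _
    (by rw [PySem.Dict.contains_eq_isSome_get?, h]; rfl)]
  refine (List.map_congr_left ?_).trans (List.map_id _)
  rintro ⟨p1, p2⟩ hp
  by_cases hc : p1 = c
  · have h2 := PySem.Dict.get?_of_mem_items d hp hnd
    rw [hc, h] at h2
    have hv : p2 = v := (Option.some.inj h2).symm
    simp [hc, hv]
  · simp [hc]

-- once (key e ↦ … val e …) is present, any further pvStep keeps it
theorem pv_preserve (key val : String × String → String) (k v : String)
    (e : String × String) (d : PySem.Dict String (PySem.Set String))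
    (h : ∃ s, d.get? k = some s ∧ v ∈ s) :
    ∃ s, (pvStep key val d e).get? k = some s ∧ v ∈ s := by
  obtain ⟨s, hs, hv⟩ := h
  by_cases hk : k = key e
  · subst hk
    refine ⟨PySem.Set.add s (val e), ?_, (PySem.Set.mem_add _ _ _).mpr (Or.inl hv)⟩
    simp only [pvStep, pvUpd, PySem.Dict.getD_of_get?_eq_some _ _ hs]
    exact PySem.Dict.get?_insert_self _ _ _
  · exact ⟨s, by simp only [pvStep, pvUpd]; rwa [PySem.Dict.get?_insert_of_ne _ _ hk], hv⟩

theorem pv_preserveFold (key val : String × String → String) (k v : String)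
    (es : List (String × String)) (d : PySem.Dict String (PySem.Set String))
    (h : ∃ s, d.get? k = some s ∧ v ∈ s) :
    ∃ s, (es.foldl (pvStep key val) d).get? k = some s ∧ v ∈ s := by
  induction es generalizing d with
  | nil => exact h
  | cons e es ih => exact ih _ (pv_preserve key val k v e d h)

-- any edge of es has its value recorded under its key after the fold
theorem pv_present (key val : String × String → String) (e : String × String)
    (es : List (String × String)) (d : PySem.Dict String (PySem.Set String))
    (he : e ∈ es) :
    ∃ s, (es.foldl (pvStep key val) d).get? (key e) = some s ∧ val e ∈ s := by
  induction es generalizing d with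
  | nil => cases he
  | cons e' es ih =>
    rcases List.mem_cons.mp he with h | h
    · subst h
      exact pv_preserveFold key val (key e) (val e) es _
        ⟨_, PySem.Dict.get?_insert_self _ _ _, (PySem.Set.mem_add _ _ _).mpr (Or.inr rfl)⟩
    · exact ih _ h

theorem pv_nodupFold (key val : String × String → String)
    (es : List (String × String)) (d : PySem.Dict String (PySem.Set String))
    (h : d.keys.Nodup) : (es.foldl (pvStep key val) d).keys.Nodup :=
  PySem.Dict.nodup_keys_foldl_insert_key es key
    (fun d e => PySem.Set.add (d.getD (key e) PySem.Set.empty) (val e)) d h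

-- re-processing an edge already seen in es is a no-op
theorem pv_absorb (key val : String × String → String) (e : String × String)
    (es : List (String × String)) (d : PySem.Dict String (PySem.Set String))
    (hnd : d.keys.Nodup) (he : e ∈ es) :
    pvStep key val (es.foldl (pvStep key val) d) e = es.foldl (pvStep key val) d := by
  obtain ⟨s, hs, hv⟩ := pv_present key val e es d he
  rw [pvStep, pvUpd, PySem.Dict.getD_of_get?_eq_some _ _ hs, PySem.Set.add_of_mem hv]
  exact pv_insert_self (pv_nodupFold key val es d hnd) hs

-- the grouping fold only sees each edge's FIRST occurrence: dedup is free
theorem pv_dedup (key val : String × String → String) (es : List (String × String))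
    (d : PySem.Dict String (PySem.Set String)) (hnd : d.keys.Nodup) :
    es.foldl (pvStep key val) d = (PySem.Set.ofList es).foldl (pvStep key val) d := by
  induction es using List.reverseRecOn with
  | nil => rfl
  | append_singleton es e ih =>
    rw [List.foldl_append, PySem.Set.ofList_append_singleton]
    by_cases he : e ∈ es
    · rw [PySem.Set.add_of_mem ((PySem.Set.mem_ofList _ _).mpr he), ← ih]
      simpa using pv_absorb key val e es d hnd he
    · rw [PySem.Set.add_of_not_mem (fun h => he ((PySem.Set.mem_ofList _ _).mp h)),
        List.foldl_append, ← ih]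

-- A's nested pair loop, flattened onto pvEdges and split into the two grouping folds
theorem pv_A_flat (catD : PySem.Dict String String) (dicD : PySem.Dict String (List String))
    (hnd : dicD.keys.Nodup) :
    dicD.keys.foldl (fun st lexicon =>
        (dicD.getD lexicon []).foldl (fun st ci =>
          (pvUpd st.1 (catD.getD ci "") lexicon, pvUpd st.2 lexicon (catD.getD ci ""))) st)
      (PySem.Dict.empty, PySem.Dict.empty)
    = ((pvEdges catD dicD).foldl (pvStep Prod.snd Prod.fst) PySem.Dict.empty,
       (pvEdges catD dicD).foldl (pvStep Prod.fst Prod.snd) PySem.Dict.empty) := by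
  have hkeys : dicD.keys.foldl (fun st lexicon =>
        (dicD.getD lexicon []).foldl (fun st ci =>
          (pvUpd st.1 (catD.getD ci "") lexicon, pvUpd st.2 lexicon (catD.getD ci ""))) st)
      (PySem.Dict.empty, PySem.Dict.empty)
      = dicD.items.foldl (fun st p =>
          p.2.foldl (fun st ci =>
            (pvUpd st.1 (catD.getD ci "") p.1, pvUpd st.2 p.1 (catD.getD ci ""))) st)
        (PySem.Dict.empty, PySem.Dict.empty) := by
    show (dicD.items.map Prod.fst).foldl _ _ = _
    rw [List.foldl_map]
    exact PySem.List.foldl_congr_mem _ _ _ _ (fun st p hp => by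
      rw [PySem.Dict.getD_of_get?_eq_some _ _ (PySem.Dict.get?_of_mem_items dicD hp hnd)])
  have hinner : ∀ (p : String × List String)
      (st : PySem.Dict String (PySem.Set String) × PySem.Dict String (PySem.Set String)),
      p.2.foldl (fun st ci =>
          (pvUpd st.1 (catD.getD ci "") p.1, pvUpd st.2 p.1 (catD.getD ci ""))) st
        = (p.2.map (fun ci => (p.1, catD.getD ci ""))).foldl
            (fun st e => (pvStep Prod.snd Prod.fst st.1 e, pvStep Prod.fst Prod.snd st.2 e)) st := by
    intro p st
    rw [List.foldl_map]
    rfl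
  rw [hkeys, PySem.List.foldl_congr_mem _ _
      (fun st p => (p.2.map (fun ci => (p.1, catD.getD ci ""))).foldl
        (fun st e => (pvStep Prod.snd Prod.fst st.1 e, pvStep Prod.fst Prod.snd st.2 e)) st)
      _ (fun st p _ => hinner p st),
    pv_foldl_flatMap, ← pvEdges]
  exact pv_pairSplit _ _ _ _ _

-- B's stage-1 nested loop builds exactly set(pvEdges)
theorem pv_B_edges (catD : PySem.Dict String String)
    (dicD : PySem.Dict String (List String)) :
    dicD.items.foldl (fun es p =>
        p.2.foldl (fun es ci =>
          if (p.1, catD.getD ci "") ∈ es then es else es ++ [(p.1, catD.getD ci "")]) es) []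
      = PySem.Set.ofList (pvEdges catD dicD) := by
  have hinner : ∀ (p : String × List String) (es : List (String × String)),
      p.2.foldl (fun es ci =>
          if (p.1, catD.getD ci "") ∈ es then es else es ++ [(p.1, catD.getD ci "")]) es
        = (p.2.map (fun ci => (p.1, catD.getD ci ""))).foldl PySem.Set.add es := by
    intro p es
    rw [List.foldl_map]
    exact PySem.List.foldl_congr_mem _ _ _ _
      (fun es ci _ => (PySem.Set.add_eq_ite _ _).symm)
  rw [PySem.List.foldl_congr_mem _ _
      (fun es p => (p.2.map (fun ci => (p.1, catD.getD ci ""))).foldl PySem.Set.add es)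
      _ (fun es p _ => hinner p es),
    pv_foldl_flatMap, ← pvEdges, PySem.Set.ofList_eq_foldl]

-- ===== VERDICT =====
theorem get_cat2lex_spec : Claim_equal_get_cat2lex := by
  intro cat dic _ _
  unfold Spec_get_cat2lex get_cat2lex get_cat2lex_alt
  simp only []
  rw [pv_A_flat (PySem.Dict.ofList cat) (PySem.Dict.ofList dic) (PySem.Dict.nodup_keys_ofList dic),
    pv_B_edges (PySem.Dict.ofList cat) (PySem.Dict.ofList dic),
    show (fun (d : PySem.Dict String (PySem.Set String)) (e : String × String) =>
        pvUpd d e.2 e.1) = pvStep Prod.snd Prod.fst from rfl,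
    show (fun (l : PySem.Dict String (PySem.Set String)) (e : String × String) =>
        pvUpd l e.1 e.2) = pvStep Prod.fst Prod.snd from rfl,
    ← pv_dedup Prod.snd Prod.fst _ _ PySem.Dict.nodup_keys_empty,
    ← pv_dedup Prod.fst Prod.snd _ _ PySem.Dict.nodup_keys_empty]
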